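-- pv_equiv track=rewrite | github.com/okamitsu320/RTLens | rtlens/rtlens/netlistsvg_view.py | _extract_defined_macros
-- ===== SOURCE A (Python) =====
-- from typing import Callable, Dict, Iterable, List, Optional, Set
--
-- def _extract_defined_macros(args: Iterable[str]) -> Set[str]:
--     out: Set[str] = set()
--     items = list(args)
--     i = 0
--     while i < len(items):
--         tok = str(items[i] or "")
--         if tok.startswith("+define+"):
--             for d in tok.split("+")[2:]:
--                 key = str(d).split("=", 1)[0].strip()
--                 if key:
--                     out.add(key)
--         elif tok == "-D" and i + 1 < len(items):
--             key = str(items[i + 1] or "").split("=", 1)[0].strip()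
--             if key:
--                 out.add(key)
--             i += 1
--         elif tok.startswith("-D") and len(tok) > 2:
--             key = tok[2:].split("=", 1)[0].strip()
--             if key:
--                 out.add(key)
--         i += 1
--     return out
-- ===== SOURCE B (Python) =====
-- def _merge_bare_D(items):
--     # Stage 1: rewrite the token stream, fusing each bare "-D" with the token
--     # that follows it ("-D", "X" -> "-DX"); a trailing bare "-D" is dropped.
--     merged = []
--     it = iter(items)
--     for tok in it:
--         if tok == "-D":
--             nxt = next(it, None)
--             if nxt is not None:
--                 merged.append("-D" + nxt)
--         else:
--             merged.append(tok)
--     return merged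
--
--
-- def _keys_of(tok):
--     # Stage 2 helper: the macro keys contributed by one rewritten token (stateless).
--     if tok.startswith("+define+"):
--         return [d.split("=", 1)[0].strip() for d in tok.split("+")[2:]]
--     if tok.startswith("-D") and len(tok) > 2:
--         return [tok[2:].split("=", 1)[0].strip()]
--     return []
--
--
-- def _extract_defined_macros(args):
--     merged = _merge_bare_D([str(t or "") for t in args])
--     return {k for tok in merged for k in _keys_of(tok) if k}
-- ===== Notes on version B (the rewrite author's own statement) =====
-- stated objective: alternative
-- what changed: A's stateful index loop with i+1 look-ahead and i+=1 skip is replaced by a three-stage pipeline: a token-stream rewrite that fuses each bare '-D' with its following argument (dropping a trailing bare '-D'), a stateless per-token key extractor flat-mapped over the rewritten stream, and a set comprehension keeping the non-empty keys.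
import Mathlib
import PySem

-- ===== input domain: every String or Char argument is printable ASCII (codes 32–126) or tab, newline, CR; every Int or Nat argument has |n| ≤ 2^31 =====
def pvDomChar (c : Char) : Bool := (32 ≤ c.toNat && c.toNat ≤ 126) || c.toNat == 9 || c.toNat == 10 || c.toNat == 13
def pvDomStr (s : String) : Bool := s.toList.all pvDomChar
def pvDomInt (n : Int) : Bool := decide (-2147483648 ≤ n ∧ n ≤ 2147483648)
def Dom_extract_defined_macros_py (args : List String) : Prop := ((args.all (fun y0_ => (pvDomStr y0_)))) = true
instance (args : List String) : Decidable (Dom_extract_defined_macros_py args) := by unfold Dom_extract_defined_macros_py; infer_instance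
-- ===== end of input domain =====

-- B replaces A's stateful index loop (manual `i`, look-ahead `items[i+1]`, `i += 1` skip) by a
-- three-stage pipeline: a token-stream rewrite fusing each bare "-D" with the following token,
-- then a stateless per-token key extractor flat-mapped over the rewritten stream, then a set
-- comprehension keeping the non-empty keys. Same cost; a plainer, staged decomposition.

-- shared helper: s.split("=", 1)[0].strip()  (both Pythons compute this exact expression)
def pvKey (s : String) : String :=
  PySem.Str.strip (((PySem.Str.splitMax? s "=" 1).getD []).headD "")

-- ===== PORT A =====
-- A's `str(items[i] or "")` is the identity on strings ("" or "" is ""), ported as the element itself.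
-- `key = …; if key: out.add(key)` as one step:
def pvAddIf (out : PySem.Set String) (key : String) : PySem.Set String :=
  if key ≠ "" then PySem.Set.add out key else out

-- A's while loop over `items` with index `i`, as recursion on the remaining list
-- (the extra `i += 1` in the bare `-D` branch = also consume `rest`'s head)
def pvLoopA : List String → PySem.Set String → PySem.Set String
  | [], out => out
  | tok :: rest, out =>
    if PySem.Str.startswith tok "+define+" then
      pvLoopA rest ((((PySem.Str.split? tok "+").getD []).drop 2).foldl (fun o d => pvAddIf o (pvKey d)) out)
    else if tok = "-D" ∧ rest ≠ [] then
      pvLoopA rest.tail (pvAddIf out (pvKey (rest.headD "")))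
    else if PySem.Str.startswith tok "-D" ∧ 2 < PySem.Str.len tok then
      pvLoopA rest (pvAddIf out (pvKey (PySem.Str.slice tok (some 2) none)))
    else pvLoopA rest out
termination_by items _ => items.length
decreasing_by all_goals simp [List.length_tail]

def extract_defined_macros_py (args : List String) : List String :=
  pvLoopA args PySem.Set.empty

-- ===== PORT B =====
-- Python's string concatenation "-D" + nxt, built on the char-list side (kernel-reducible; exact)
def pvFuse (nxt : String) : String := String.ofList ('-' :: 'D' :: nxt.toList)

-- stage 1: rewrite the token stream — fuse each bare "-D" with its successor, drop a trailing one
def pvMergeBareD : List String → List String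
  | [] => []
  | tok :: rest =>
    if tok = "-D" then
      match rest with
      | [] => []                         -- next(it, None) is None: nothing appended, loop ends
      | nxt :: rest' => pvFuse nxt :: pvMergeBareD rest'
    else tok :: pvMergeBareD rest

-- stage 2 helper: the macro keys contributed by one rewritten token (stateless)
def pvKeysOf (tok : String) : List String :=
  if PySem.Str.startswith tok "+define+" then
    (((PySem.Str.split? tok "+").getD []).drop 2).map pvKey
  else if PySem.Str.startswith tok "-D" ∧ 2 < PySem.Str.len tok then
    [pvKey (PySem.Str.slice tok (some 2) none)]
  else []

-- stages 2+3: {k for tok in merged for k in _keys_of(tok) if k}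
def extract_defined_macros_py_alt (args : List String) : List String :=
  PySem.Set.ofList (((pvMergeBareD args).flatMap pvKeysOf).filter (fun k => k ≠ ""))

-- ===== PRECONDITION & SPEC =====
def Spec_extract_defined_macros_py (args : List String) (out : List String) : Prop := out = extract_defined_macros_py_alt args
instance (args : List String) (out : List String) : Decidable (Spec_extract_defined_macros_py args out) := by unfold Spec_extract_defined_macros_py; infer_instance

-- ===== CLAIM (what is proved, stated in full; the proofs are below) =====
def Claim_equal_extract_defined_macros_py : Prop := ∀ (args : List String), Dom_extract_defined_macros_py args → Spec_extract_defined_macros_py args (extract_defined_macros_py args)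

-- ===== LEMMAS AND PROOFS =====

-- folding Set.add over the non-empty keys = folding add-if-non-empty over all keys
theorem foldl_add_filter (l : List String) (s : PySem.Set String) :
    (l.filter (fun k => k ≠ "")).foldl PySem.Set.add s = l.foldl pvAddIf s := by
  induction l generalizing s with
  | nil => rfl
  | cons k l ih =>
    rw [List.filter_cons, List.foldl_cons]
    by_cases hk : k = ""
    · rw [if_neg (by simp [hk]), ih]
      unfold pvAddIf
      rw [if_neg (by simp [hk])]
    · rw [if_pos (by simp [hk]), List.foldl_cons, ih]
      unfold pvAddIf
      rw [if_pos hk]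

theorem toList_fuse (nxt : String) : (pvFuse nxt).toList = '-' :: 'D' :: nxt.toList := by
  simp [pvFuse]

theorem fuse_not_define (nxt : String) :
    PySem.Str.startswith (pvFuse nxt) "+define+" = false := by
  simp [pvFuse, PySem.Chars.startswith, List.isPrefixOf]

theorem slice_fuse (nxt : String) :
    PySem.Str.slice (pvFuse nxt) (some 2) none = nxt := by
  apply String.toList_inj.mp
  rw [PySem.Str.toList_slice, toList_fuse]
  simp [PySem.Chars.slice, PySem.List.slice, PySem.List.clampIdx]

-- the keys of a fused token, folded into the set, are exactly A's bare "-D" step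
theorem foldl_keysOf_fuse (nxt : String) (out : PySem.Set String) :
    (pvKeysOf (pvFuse nxt)).foldl pvAddIf out = pvAddIf out (pvKey nxt) := by
  unfold pvKeysOf
  rw [fuse_not_define]
  by_cases h : nxt = ""
  · subst h
    simp only [Bool.false_eq_true, if_false]
    rw [if_neg (by decide)]
    have : pvKey "" = "" := by decide
    simp [pvAddIf, this]
  · have hlen : (2 : Int) < PySem.Str.len (pvFuse nxt) := by
      have h1 : (PySem.Str.len (pvFuse nxt)) = ((pvFuse nxt).toList.length : Int) := by
        simp [PySem.Str.len_eq]
      have h2 : nxt.toList ≠ [] := fun hc => h (String.toList_inj.mp (by simp [hc]))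
      rw [h1, toList_fuse]
      simp only [List.length_cons]
      have : 0 < nxt.toList.length := List.length_pos_iff.mpr h2
      omega
    have hsw : PySem.Str.startswith (pvFuse nxt) "-D" = true := by
      simp [pvFuse, PySem.Chars.startswith, List.isPrefixOf]
    simp only [Bool.false_eq_true, if_false]
    rw [if_pos ⟨hsw, hlen⟩, List.foldl_cons, List.foldl_nil, slice_fuse]

-- A's loop = the fold of add-if-non-empty over B's flat-mapped key stream
theorem keysOf_define (tok : String) (h1 : PySem.Str.startswith tok "+define+" = true) :
    pvKeysOf tok = (((PySem.Str.split? tok "+").getD []).drop 2).map pvKey := by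
  unfold pvKeysOf; rw [if_pos h1]

theorem keysOf_dash (tok : String) (h1 : ¬ PySem.Str.startswith tok "+define+" = true)
    (h3 : PySem.Str.startswith tok "-D" = true ∧ 2 < PySem.Str.len tok) :
    pvKeysOf tok = [pvKey (PySem.Str.slice tok (some 2) none)] := by
  unfold pvKeysOf; rw [if_neg h1, if_pos h3]

theorem keysOf_nil (tok : String) (h1 : ¬ PySem.Str.startswith tok "+define+" = true)
    (h3 : ¬ (PySem.Str.startswith tok "-D" = true ∧ 2 < PySem.Str.len tok)) :
    pvKeysOf tok = [] := by
  unfold pvKeysOf; rw [if_neg h1, if_neg h3]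

theorem pvLoopA_eq_foldl (items : List String) (out : PySem.Set String) :
    pvLoopA items out = ((pvMergeBareD items).flatMap pvKeysOf).foldl pvAddIf out := by
  induction items using pvMergeBareD.induct generalizing out with
  | case1 => rw [pvLoopA, pvMergeBareD]; rfl
  | case2 =>
    rw [pvLoopA, if_neg (by decide), if_neg (by simp), if_neg (by decide), pvLoopA]
    have hm : pvMergeBareD ["-D"] = [] := by rw [pvMergeBareD.eq_def]; simp
    rw [hm]; rfl
  | case3 nxt rest' ih =>
    rw [pvLoopA, if_neg (by decide), if_pos ⟨rfl, by simp⟩]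
    have hm : pvMergeBareD ("-D" :: nxt :: rest') = pvFuse nxt :: pvMergeBareD rest' := by
      rw [pvMergeBareD.eq_def]; simp
    rw [hm, List.flatMap_cons, List.foldl_append, List.tail_cons, List.headD_cons,
        foldl_keysOf_fuse, ih]
  | case4 tok rest h ih =>
    have hm : pvMergeBareD (tok :: rest) = tok :: pvMergeBareD rest := by
      rw [pvMergeBareD.eq_def]; simp [h]
    rw [pvLoopA, hm, List.flatMap_cons, List.foldl_append]
    by_cases h1 : PySem.Str.startswith tok "+define+" = true
    · rw [if_pos h1, keysOf_define tok h1, List.foldl_map, ih]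
    · rw [if_neg h1, if_neg (fun hc => h hc.1)]
      by_cases h3 : PySem.Str.startswith tok "-D" = true ∧ 2 < PySem.Str.len tok
      · rw [if_pos h3, keysOf_dash tok h1 h3, List.foldl_cons, List.foldl_nil, ih]
      · rw [if_neg h3, keysOf_nil tok h1 h3, List.foldl_nil, ih]

-- ===== VERDICT (by name: the statement is the Claim_ definition above) =====
theorem extract_defined_macros_py_spec : Claim_equal_extract_defined_macros_py := by
  intro args _
  unfold Spec_extract_defined_macros_py extract_defined_macros_py extract_defined_macros_py_alt
  rw [PySem.Set.ofList_eq_foldl, foldl_add_filter, pvLoopA_eq_foldl]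
  rfl
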